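-- pv_equiv track=rewrite | github.com/hanzhangshen03/Machine_Learning_and_Real-world_Data | exercises/tick6.py | get_agreement_table
-- ===== SOURCE A (Python) =====
-- from typing import List, Dict, Union
--
-- def get_agreement_table(review_predictions: List[Dict[int, int]]) -> Dict[int, Dict[int,int]]:
--     """
--     Builds an agreement table from the student predictions.
--
--     @param review_predictions: a list of predictions for each student, the predictions are encoded as dictionaries, with the key being the review id and the value the predicted sentiment
--     @return: an agreement table, which for each review contains the number of predictions that predicted each sentiment.
--     """
--     sentiments = set().union(*(set(d.values()) for d in review_predictions))
--     reviews = set.union(*(set(d.keys()) for d in review_predictions))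
--     result = {review: {sentiment: 0 for sentiment in sentiments} for review in reviews}
--
--     # count the number of predictions for each review under each class
--     for item in review_predictions:
--         for k in item.keys():
--             result[k][item[k]] += 1
--     return result
-- ===== SOURCE B (Python) =====
-- def get_agreement_table(review_predictions):
--     """For each review, gather the sentiments predicted for it across all students,
--     then count each global sentiment directly in that per-review list."""
--     reviews = list(dict.fromkeys(k for d in review_predictions for k in d))
--     sentiments = list(dict.fromkeys(v for d in review_predictions for v in d.values()))
--     result = {}
--     for r in reviews:
--         votes = [d[r] for d in review_predictions if r in d]
--         result[r] = {s: votes.count(s) for s in sentiments}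
--     return result
-- ===== Notes on version B (the rewrite author's own statement) =====
-- stated objective: alternative
-- what changed: Instead of A's mutable table (prefill a dense zero table, then increment cells while scanning the predictions), B never maintains a counter: it loops over the reviews, gathers that review's predicted sentiments into a plain list by scanning the student dicts, and fills the row by list.count per sentiment.
-- outside the precondition, e.g. on get_agreement_table([]): A raises TypeError, B returns {}
import Mathlib
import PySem

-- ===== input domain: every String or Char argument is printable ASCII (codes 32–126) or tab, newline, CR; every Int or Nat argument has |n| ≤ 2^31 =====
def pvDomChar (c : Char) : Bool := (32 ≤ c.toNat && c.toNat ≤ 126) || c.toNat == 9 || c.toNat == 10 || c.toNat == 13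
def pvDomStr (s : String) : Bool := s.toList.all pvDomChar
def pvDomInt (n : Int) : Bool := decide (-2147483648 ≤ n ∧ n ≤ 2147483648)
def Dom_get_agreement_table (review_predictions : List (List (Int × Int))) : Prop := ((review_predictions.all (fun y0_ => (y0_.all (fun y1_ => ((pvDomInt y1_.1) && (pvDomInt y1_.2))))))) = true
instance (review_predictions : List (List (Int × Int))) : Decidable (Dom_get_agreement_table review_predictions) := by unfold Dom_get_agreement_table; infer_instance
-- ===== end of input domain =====

-- B replaces A's mutable counting table (prefill zeros, then increment) by a per-review
-- gather-the-votes list counted with list.count; equivalence of RETURN values only.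

-- ===== PORT A =====
-- Each Python dict argument is realised from its association list by PySem.Dict.ofList
-- (insertion order, last value wins), exactly Python's dict construction.
def get_agreement_table (review_predictions : List (List (Int × Int))) : List (Int × List (Int × Int)) :=
  let dicts : List (PySem.Dict Int Int) := review_predictions.map PySem.Dict.ofList
  -- sentiments = set().union(*(set(d.values()) for d in review_predictions))
  let sentiments : PySem.Set Int :=
    dicts.foldl (fun s d => PySem.Set.union s (PySem.Set.ofList (PySem.Dict.values d))) PySem.Set.empty
  -- reviews = set.union(*(set(d.keys()) for d in review_predictions))  (raises on [], excluded by Pre_)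
  let reviews : PySem.Set Int :=
    dicts.foldl (fun s d => PySem.Set.union s (PySem.Set.ofList (PySem.Dict.keys d))) PySem.Set.empty
  -- result = {review: {sentiment: 0 for sentiment in sentiments} for review in reviews}
  let result : PySem.Dict Int (PySem.Dict Int Int) :=
    reviews.foldl (fun res review =>
      res.insert review (sentiments.foldl (fun t s => t.insert s 0) PySem.Dict.empty)) PySem.Dict.empty
  -- for item in review_predictions: for k in item.keys(): result[k][item[k]] += 1
  -- item[k] is written item.getD k 0: k ranges over item.keys so the lookup provably succeeds;
  -- likewise result[k] / the inner [item[k]] are present by construction, so modify-with-default is exact.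
  let result :=
    dicts.foldl (fun res item =>
      (PySem.Dict.keys item).foldl (fun res k =>
        res.modify k PySem.Dict.empty (fun inner => inner.modify (item.getD k 0) 0 (· + 1))) res) result
  result.items.map (fun p => (p.1, p.2.items))

-- ===== PORT B =====
def get_agreement_table_alt (review_predictions : List (List (Int × Int))) : List (Int × List (Int × Int)) :=
  let dicts : List (PySem.Dict Int Int) := review_predictions.map PySem.Dict.ofList
  -- reviews = list(dict.fromkeys(k for d in review_predictions for k in d))
  let reviews : List Int := PySem.List.dedup (dicts.flatMap PySem.Dict.keys)
  -- sentiments = list(dict.fromkeys(v for d in review_predictions for v in d.values()))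
  let sentiments : List Int := PySem.List.dedup (dicts.flatMap PySem.Dict.values)
  -- for r in reviews: votes = [d[r] for d in review_predictions if r in d]
  -- d[r] is written d.getD r 0: the comprehension's guard 'r in d' ensures the lookup succeeds.
  reviews.map (fun r =>
    let votes : List Int := (dicts.filter (fun d => d.contains r)).map (fun d => d.getD r 0)
    (r, sentiments.map (fun s => (s, (votes.count s : Int)))))

-- ===== PRECONDITION & SPEC =====
-- A raises TypeError on the empty list (set.union(*()) has no arguments); that single input is excluded.
def Pre_get_agreement_table (review_predictions : List (List (Int × Int))) : Prop :=
  review_predictions ≠ []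
instance (review_predictions : List (List (Int × Int))) : Decidable (Pre_get_agreement_table review_predictions) := by unfold Pre_get_agreement_table; infer_instance
def pvWitness_get_agreement_table : (List (List (Int × Int))) := [[(1, 0), (2, 1)], [(1, 1)]]

def Spec_get_agreement_table (review_predictions : List (List (Int × Int))) (out : List (Int × List (Int × Int))) : Prop := out = get_agreement_table_alt review_predictions
instance (review_predictions : List (List (Int × Int))) (out : List (Int × List (Int × Int))) : Decidable (Spec_get_agreement_table review_predictions out) := by unfold Spec_get_agreement_table; infer_instance

-- ===== CLAIM (what is proved, stated in full; the proofs are below) =====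
def Claim_equal_get_agreement_table : Prop := ∀ (review_predictions : List (List (Int × Int))), Dom_get_agreement_table review_predictions → Pre_get_agreement_table review_predictions → Spec_get_agreement_table review_predictions (get_agreement_table review_predictions)
-- ===== LEMMAS AND PROOFS =====

-- the flattened (review, sentiment) prediction pairs, after dict-collapse of each student's list
def pvFlat (review_predictions : List (List (Int × Int))) : List (Int × Int) :=
  (review_predictions.map PySem.Dict.ofList).flatMap PySem.Dict.items

theorem pv_update_ofList {α : Type} [BEq α] [LawfulBEq α] (s : PySem.Set α) (xs : List α) :
    PySem.Set.update s (PySem.Set.ofList xs) = PySem.Set.update s xs := by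
  rw [PySem.Set.update_eq_append_filter, PySem.Set.update_eq_append_filter, PySem.Set.ofList_ofList]

theorem pv_update_of_subset {α : Type} [BEq α] [LawfulBEq α] (s : PySem.Set α) (xs : List α)
    (h : ∀ x ∈ xs, x ∈ s) : PySem.Set.update s xs = s := by
  induction xs generalizing s with
  | nil => rfl
  | cons x xs ih =>
    rw [PySem.Set.update_cons, PySem.Set.add_of_mem (h x (by simp))]
    exact ih s (fun y hy => h y (by simp [hy]))

theorem pv_union_fold {α β : Type} [BEq α] [LawfulBEq α] (f : β → List α) (l : List β) (init : PySem.Set α) :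
    l.foldl (fun s d => PySem.Set.union s (PySem.Set.ofList (f d))) init
      = PySem.Set.update init (l.flatMap f) := by
  induction l generalizing init with
  | nil => rfl
  | cons d l ih =>
    rw [List.foldl_cons, ih, List.flatMap_cons, PySem.Set.update_append]
    congr 1
    show PySem.Set.update init (PySem.Set.ofList (f d)) = _
    exact pv_update_ofList init (f d)

-- per-review projection of A's increment loop
theorem pv_A_proj (l : List (Int × Int)) (res : PySem.Dict Int (PySem.Dict Int Int)) (r : Int) :
    (l.foldl (fun res kv =>
        res.modify kv.1 PySem.Dict.empty (fun inner => inner.modify kv.2 0 (· + 1))) res).getD r PySem.Dict.empty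
      = ((l.filter (fun p => p.1 == r)).map (·.2)).foldl
          (fun inner v => inner.modify v 0 (· + 1)) (res.getD r PySem.Dict.empty) := by
  induction l generalizing res with
  | nil => rfl
  | cons kv l ih =>
    obtain ⟨k, v⟩ := kv
    rw [List.foldl_cons, ih, List.filter_cons]
    simp only [PySem.Dict.getD_modify, beq_iff_eq]
    by_cases hr : k = r
    · subst hr; simp
    · simp [hr, Ne.symm hr]

theorem pv_count_filter_map (l : List (Int × Int)) (r v : Int) :
    (((l.filter (fun p => p.1 == r)).map (·.2)).count v) = l.count (r, v) := by
  induction l with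
  | nil => rfl
  | cons kv l ih =>
    obtain ⟨k, w⟩ := kv
    rw [List.filter_cons, List.count_cons]
    by_cases hr : k = r
    · subst hr
      rw [if_pos (by simp), List.map_cons, List.count_cons, ih]
      congr 1
      by_cases hs : v = w <;> simp [hs, Prod.ext_iff]
    · rw [if_neg (by simp [hr]), ih]
      simp
      intro h
      exact absurd h hr

-- generic fold bookkeeping
theorem pv_foldl_flat {σ : Type} (f : σ → (Int × Int) → σ) (rp : List (List (Int × Int))) (init : σ) :
    rp.foldl (fun st d => ((PySem.Dict.ofList d).items).foldl f st) init = (pvFlat rp).foldl f init := by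
  induction rp generalizing init with
  | nil => rfl
  | cons d rp ih =>
    rw [List.foldl_cons]
    unfold pvFlat
    rw [List.map_cons, List.flatMap_cons, List.foldl_append]
    exact ih _

theorem pv_foldl_congr {σ α : Type} (l : List α) (f g : σ → α → σ) (init : σ)
    (h : ∀ a ∈ l, ∀ s, f s a = g s a) : l.foldl f init = l.foldl g init := by
  induction l generalizing init with
  | nil => rfl
  | cons a l ih => rw [List.foldl_cons, List.foldl_cons, h a (by simp)]
                   exact ih _ (fun a ha s => h a (by simp [ha]) s)

-- the zero-prefilled inner table of A
theorem pv_zero_getD (l : List Int) (t : PySem.Dict Int Int) (h : ∀ s, t.getD s 0 = 0) :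
    ∀ s, (l.foldl (fun t s => t.insert s 0) t).getD s 0 = 0 := by
  induction l generalizing t with
  | nil => exact h
  | cons x l ih =>
    intro s
    rw [List.foldl_cons]
    refine ih _ (fun s => ?_) s
    rw [PySem.Dict.getD_insert]
    split_ifs with hx
    · rfl
    · exact h s

-- one dict's items contain (r, s) once iff it maps r to s
theorem pv_items_count (d : PySem.Dict Int Int) (hnd : d.keys.Nodup) (r s : Int) :
    d.items.count (r, s) = (if d.contains r then (if d.getD r 0 = s then 1 else 0) else 0) := by
  by_cases hc : d.contains r
  · rw [if_pos hc]
    have hsome : ∃ v, d.get? r = some v := by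
      rcases h : d.get? r with _ | v
      · exact absurd ((PySem.Dict.get?_eq_none_iff_contains d r).1 h) (by simp [hc])
      · exact ⟨v, rfl⟩
    obtain ⟨v, hv⟩ := hsome
    have hmem : (r, v) ∈ d.items := PySem.Dict.mem_items_of_get?_eq_some d hv
    have hgd : d.getD r 0 = v := by rw [PySem.Dict.getD_eq_get?_getD, hv]; rfl
    by_cases hs : d.getD r 0 = s
    · rw [if_pos hs]
      have : (r, s) ∈ d.items := by rw [← hs, hgd] at *; exact hmem
      exact List.count_eq_one_of_mem (List.Nodup.of_map _ hnd) this
    · rw [if_neg hs]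
      refine List.count_eq_zero.2 (fun hmem' => hs ?_)
      exact PySem.Dict.getD_of_mem_items d hmem' hnd 0
  · rw [if_neg hc]
    refine List.count_eq_zero.2 (fun hmem' => hc ?_)
    exact (PySem.Dict.contains_iff_mem_keys d r).2 (PySem.Dict.mem_keys_of_mem_items d hmem')

-- B's gathered votes count equals the flat pair count
theorem pv_votes_count (ds : List (PySem.Dict Int Int)) (h : ∀ d ∈ ds, d.keys.Nodup) (r s : Int) :
    ((ds.filter (fun d => d.contains r)).map (fun d => d.getD r 0)).count s
      = (ds.flatMap PySem.Dict.items).count (r, s) := by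
  induction ds with
  | nil => rfl
  | cons d ds ih =>
    rw [List.flatMap_cons, List.count_append, List.filter_cons,
      pv_items_count d (h d (by simp)) r s,
      ← ih (fun d hd => h d (by simp [hd]))]
    by_cases hc : d.contains r
    · rw [if_pos (by simp [hc]), List.map_cons, List.count_cons]
      by_cases hs : d.getD r 0 = s <;> simp [hc, hs, Nat.add_comm]
    · rw [if_neg (by simp [hc])]
      simp [hc]

-- B's result, in closed form
theorem pv_B_eq (rp : List (List (Int × Int))) :
    get_agreement_table_alt rp =
      (PySem.Set.ofList ((pvFlat rp).map (·.1))).map (fun r =>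
        (r, (PySem.Set.ofList ((pvFlat rp).map (·.2))).map (fun s =>
          (s, (((pvFlat rp).count (r, s) : Int)))))) := by
  unfold get_agreement_table_alt
  simp only [PySem.List.dedup_eq_ofList]
  have hkeys0 : (rp.map PySem.Dict.ofList).flatMap PySem.Dict.keys = (pvFlat rp).map (·.1) := by
    unfold pvFlat
    rw [List.map_flatMap]
    rfl
  have hvals : (rp.map PySem.Dict.ofList).flatMap PySem.Dict.values = (pvFlat rp).map (·.2) := by
    unfold pvFlat
    rw [List.map_flatMap]
    rfl
  rw [hkeys0, hvals]
  refine List.map_congr_left (fun r _ => ?_)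
  congr 1
  refine List.map_congr_left (fun s _ => ?_)
  congr 1
  rw [pv_votes_count _ (fun d hd => by
      obtain ⟨l, _, rfl⟩ := List.mem_map.1 hd
      exact PySem.Dict.nodup_keys_ofList l) r s]
  rfl

-- A's result, in closed form
theorem pv_A_eq (rp : List (List (Int × Int))) :
    get_agreement_table rp =
      (PySem.Set.ofList ((pvFlat rp).map (·.1))).map (fun r =>
        (r, (PySem.Set.ofList ((pvFlat rp).map (·.2))).map (fun s =>
          (s, (((pvFlat rp).count (r, s) : Int)))))) := by
  unfold get_agreement_table
  simp only []
  rw [pv_union_fold, pv_union_fold, PySem.Set.update_empty, PySem.Set.update_empty]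
  have hvals : (rp.map PySem.Dict.ofList).flatMap PySem.Dict.values = (pvFlat rp).map (·.2) := by
    unfold pvFlat
    rw [List.map_flatMap]
    rfl
  have hkeys0 : (rp.map PySem.Dict.ofList).flatMap PySem.Dict.keys = (pvFlat rp).map (·.1) := by
    unfold pvFlat
    rw [List.map_flatMap]
    rfl
  rw [hvals, hkeys0]
  set S := PySem.Set.ofList ((pvFlat rp).map (·.2)) with hS
  set R := PySem.Set.ofList ((pvFlat rp).map (·.1)) with hR
  have hSnd : S.Nodup := by rw [hS]; exact PySem.Set.nodup_ofList _
  have hRnd : R.Nodup := by rw [hR]; exact PySem.Set.nodup_ofList _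
  set zero := S.foldl (fun (t : PySem.Dict Int Int) s => t.insert s 0) PySem.Dict.empty with hzero
  -- the prefilled inner table
  have hz_items : zero.items = S.map (fun s => (s, (0 : Int))) := by
    rw [hzero]
    have := PySem.Dict.items_foldl_insert_fresh (l := S) (k := fun s => s) (v := fun _ => (0 : Int))
      (d := PySem.Dict.empty) (fun a _ => PySem.Dict.contains_empty a) (by simpa using hSnd)
    simpa using this
  have hz_keys : zero.keys = S := by
    show zero.items.map (·.1) = S
    rw [hz_items, List.map_map]
    simp only [Function.comp_def]
    simp
  have hz_getD : ∀ s, zero.getD s 0 = 0 := by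
    intro s
    rw [hzero]
    exact pv_zero_getD S PySem.Dict.empty (fun s => PySem.Dict.getD_empty _ _) s
  set res0 := R.foldl (fun (res : PySem.Dict Int (PySem.Dict Int Int)) review => res.insert review zero) PySem.Dict.empty with hres0
  have hres0_items : res0.items = R.map (fun r => (r, zero)) := by
    rw [hres0]
    have := PySem.Dict.items_foldl_insert_fresh (l := R) (k := fun r => r) (v := fun _ => zero)
      (d := PySem.Dict.empty) (fun a _ => PySem.Dict.contains_empty a) (by simpa using hRnd)
    simpa using this
  have hres0_keys : res0.keys = R := by
    show res0.items.map (·.1) = R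
    rw [hres0_items, List.map_map]
    simp only [Function.comp_def]
    simp
  have hres0_getD : ∀ r ∈ R, res0.getD r PySem.Dict.empty = zero := by
    intro r hr
    exact PySem.Dict.getD_of_mem_items res0
      (by rw [hres0_items]; exact List.mem_map.2 ⟨r, hr, rfl⟩)
      (by rw [hres0_keys]; exact hRnd) PySem.Dict.empty
  -- the increment loop, flattened
  have hloop : (rp.map PySem.Dict.ofList).foldl (fun res item =>
        (PySem.Dict.keys item).foldl (fun res k =>
          res.modify k PySem.Dict.empty (fun inner => inner.modify (item.getD k 0) 0 (· + 1))) res) res0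
      = (pvFlat rp).foldl (fun res kv =>
          res.modify kv.1 PySem.Dict.empty (fun inner => inner.modify kv.2 0 (· + 1))) res0 := by
    rw [← pv_foldl_flat, List.foldl_map]
    refine pv_foldl_congr _ _ _ _ (fun d _ res => ?_)
    rw [PySem.Dict.items_eq_map_keys (PySem.Dict.ofList d) (PySem.Dict.nodup_keys_ofList d) 0,
      List.foldl_map]
  rw [hloop]
  set resF := (pvFlat rp).foldl (fun res kv =>
          res.modify kv.1 PySem.Dict.empty (fun inner => inner.modify kv.2 0 (· + 1))) res0 with hresF
  have hF_keys : resF.keys = R := by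
    rw [hresF, PySem.Dict.keys_foldl_modify_key (key := fun kv : Int × Int => kv.1), hres0_keys]
    refine pv_update_of_subset _ _ (fun x hx => ?_)
    rw [hR]
    exact (PySem.Set.mem_ofList _ _).2 hx
  have hF_nd : resF.keys.Nodup := by
    rw [hF_keys]; exact hRnd
  rw [PySem.Dict.items_eq_map_keys resF hF_nd PySem.Dict.empty, List.map_map, hF_keys]
  refine List.map_congr_left (fun r hr => ?_)
  simp only [Function.comp]
  congr 1
  have hinner : resF.getD r PySem.Dict.empty
      = (((pvFlat rp).filter (fun p => p.1 == r)).map (·.2)).foldl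
          (fun inner v => inner.modify v 0 (· + 1)) zero := by
    rw [hresF, pv_A_proj, hres0_getD r hr]
  have hin_keys : (resF.getD r PySem.Dict.empty).keys = S := by
    rw [hinner, PySem.Dict.keys_foldl_modify _ _ (fun _ _ => (· + 1)), hz_keys]
    refine pv_update_of_subset _ _ (fun v hv => ?_)
    rw [hS]
    refine (PySem.Set.mem_ofList _ _).2 ?_
    obtain ⟨p, hp, rfl⟩ := List.mem_map.1 hv
    exact List.mem_map.2 ⟨p, (List.mem_filter.1 hp).1, rfl⟩
  have hin_nd : (resF.getD r PySem.Dict.empty).keys.Nodup := by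
    rw [hin_keys]; exact hSnd
  rw [PySem.Dict.items_eq_map_keys _ hin_nd 0, hin_keys]
  refine List.map_congr_left (fun s _ => ?_)
  congr 1
  rw [hinner, PySem.Dict.getD_foldl_modify_add_one, hz_getD, pv_count_filter_map]
  simp

-- ===== VERDICT (by name: the statement is the Claim_ definition above) =====
theorem get_agreement_table_spec : Claim_equal_get_agreement_table := by
  intro rp _ _
  unfold Spec_get_agreement_table
  rw [pv_A_eq, pv_B_eq]
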